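-- pv_equiv track=rewrite | github.com/cancaonovachor/chord-analysis-backend | musicxml_chord_analysis.py | getChordRoot
-- ===== SOURCE A (Python) =====
-- def getChordRoot(s):  # -> tuple[str]:
--     # ex) G#power -> G#
--     # ex) G--dim -> G--
--     # 戻り値： 根音+変位の文字列、（root,alterの２つを返すわけではない）
--     # TODO: 後々、根音の戻り値を統一しておく必要がある。
--
--     result = s[0]
--     # 先頭3文字 or chord root要素と関係ないものが来るまで繰り返し
--     for i in range(1, min(3, len(s))):
--         # - or # が来たらそれも追加
--         if s[i] in {"#", "-"}:
--             result += s[i]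
--         else:
--             break
--     return result
-- ===== SOURCE B (Python) =====
-- def getChordRoot(s):
--     head = s[0]
--     body = s[1:3]
--     n = len(body) - len(body.lstrip('#-'))
--     return head + body[:n]
-- ===== Notes on version B (the rewrite author's own statement) =====
-- stated objective: idiomatic
-- what changed: Replaces the explicit index loop with break by string-method arithmetic: the accidental run is measured as the length lstrip('#-') removes from the s[1:3] window, so no loop or index bookkeeping remains.
import Mathlib
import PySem

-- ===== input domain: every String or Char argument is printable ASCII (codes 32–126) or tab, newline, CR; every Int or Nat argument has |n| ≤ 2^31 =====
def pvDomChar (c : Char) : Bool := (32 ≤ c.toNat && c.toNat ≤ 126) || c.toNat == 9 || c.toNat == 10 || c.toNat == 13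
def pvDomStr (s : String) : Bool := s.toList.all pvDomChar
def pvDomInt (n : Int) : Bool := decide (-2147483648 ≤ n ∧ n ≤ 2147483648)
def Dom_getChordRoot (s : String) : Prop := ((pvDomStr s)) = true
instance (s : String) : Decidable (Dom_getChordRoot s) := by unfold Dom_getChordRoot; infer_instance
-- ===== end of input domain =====

-- B replaces A's index loop with string-method arithmetic (length removed by lstrip('#-') on the s[1:3] window); idiomatic, same cost.

-- ===== PORT A =====
-- the 'for i in range(...)' loop with break, accumulating into result
def getChordRootLoopA (cs : List Char) : List Int → String → String
  | [], result => result
  | i :: rest, result =>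
    match PySem.List.pyGet? cs i with
    | none => result  -- unreachable: i taken from range(1, min(3, len(s)))
    | some c => if c = '#' ∨ c = '-' then getChordRootLoopA cs rest (result.push c) else result

def getChordRoot (s : String) : String :=
  match PySem.Str.pyGet? s 0 with
  | none => ""  -- IndexError in Python; excluded by Pre_
  | some c =>
    getChordRootLoopA s.toList (PySem.List.pyRange 1 (min 3 (s.toList.length : Int)) 1) (String.ofList [c])

-- ===== PORT B =====
def getChordRoot_alt (s : String) : String :=
  match PySem.Str.pyGet? s 0 with
  | none => ""  -- IndexError in Python; excluded by Pre_
  | some head =>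
    let body := PySem.List.slice s.toList (some 1) (some 3)
    -- len(body) - len(body.lstrip('#-')): lstrip with a char set = dropWhile membership (exact)
    let n := body.length - (body.dropWhile (fun c => c == '#' || c == '-')).length
    String.ofList (head :: body.take n)

-- ===== PRECONDITION & SPEC =====
-- A raises IndexError on the empty string (s[0]); excluded.
def Pre_getChordRoot (s : String) : Prop := s ≠ ""
instance (s : String) : Decidable (Pre_getChordRoot s) := by unfold Pre_getChordRoot; infer_instance
def pvWitness_getChordRoot : String := "G#power"

def Spec_getChordRoot (s : String) (out : String) : Prop := out = getChordRoot_alt s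
instance (s : String) (out : String) : Decidable (Spec_getChordRoot s out) := by unfold Spec_getChordRoot; infer_instance

-- ===== CLAIM (what is proved, stated in full; the proofs are below) =====
def Claim_equal_getChordRoot : Prop := ∀ (s : String), Dom_getChordRoot s → Pre_getChordRoot s → Spec_getChordRoot s (getChordRoot s)

-- ===== LEMMAS AND PROOFS =====

theorem getChordRoot_eq_alt (s : String) (h : s ≠ "") : getChordRoot s = getChordRoot_alt s := by
  have hp1 : ∀ n : Nat, (0:Int) ≤ (n:Int) + 1 := by intro n; omega
  have hp2 : ∀ n : Nat, (0:Int) ≤ (n:Int) + 1 + 1 := by intro n; omega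
  have hp3 : ∀ n : Nat, (2:Int) ≤ (n:Int) + 1 + 1 := by intro n; omega
  rcases hcs : s.toList with _ | ⟨a, _ | ⟨b, _ | ⟨c, r⟩⟩⟩
  · exact absurd (by simpa using congrArg String.ofList hcs) h
  all_goals
    have hget : PySem.Str.pyGet? s 0 = some a := by
      simp [PySem.Str.pyGet?, hcs, PySem.List.pyGet?, PySem.List.pyIdx?, hp1, hp2]
    rw [getChordRoot, getChordRoot_alt, hget]
    refine String.toList_inj.mp ?_
  · simp [hcs, PySem.List.pyRange, PySem.List.slice, PySem.List.clampIdx, getChordRootLoopA]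
  · by_cases hb : b = '#' ∨ b = '-'
    · rcases hb with hb | hb <;>
        simp [hcs, hb, PySem.List.pyRange, PySem.List.slice, PySem.List.clampIdx,
          getChordRootLoopA, PySem.List.pyGet?, PySem.List.pyIdx?, List.range_succ, hp1, hp2, hp3]
    · push_neg at hb
      simp [hcs, hb.1, hb.2, PySem.List.pyRange, PySem.List.slice, PySem.List.clampIdx,
        getChordRootLoopA, PySem.List.pyGet?, PySem.List.pyIdx?, List.range_succ, hp1, hp2, hp3]
  · have hm : min (3 : Int) (((a :: b :: c :: r).length : Nat) : Int) = 3 := by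
      simp; omega
    rw [hcs, hm]
    by_cases hb : b = '#' ∨ b = '-' <;> by_cases hc : c = '#' ∨ c = '-'
    · rcases hb with hb | hb <;> rcases hc with hc | hc <;>
        simp [hb, hc, PySem.List.pyRange, PySem.List.slice, PySem.List.clampIdx,
          getChordRootLoopA, PySem.List.pyGet?, PySem.List.pyIdx?, List.range_succ, hp1, hp2, hp3]
    · push_neg at hc
      rcases hb with hb | hb <;>
        simp [hb, hc.1, hc.2, PySem.List.pyRange, PySem.List.slice, PySem.List.clampIdx,
          getChordRootLoopA, PySem.List.pyGet?, PySem.List.pyIdx?, List.range_succ, hp1, hp2, hp3]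
    · push_neg at hb
      simp [hb.1, hb.2, PySem.List.pyRange, PySem.List.slice, PySem.List.clampIdx,
        getChordRootLoopA, PySem.List.pyGet?, PySem.List.pyIdx?, List.range_succ, hp1, hp2, hp3]
    · push_neg at hb
      simp [hb.1, hb.2, PySem.List.pyRange, PySem.List.slice, PySem.List.clampIdx,
        getChordRootLoopA, PySem.List.pyGet?, PySem.List.pyIdx?, List.range_succ, hp1, hp2, hp3]

-- ===== VERDICT (by name: the statement is the Claim_ definition above) =====
theorem getChordRoot_spec : Claim_equal_getChordRoot := by
  intro s _ hpre
  exact getChordRoot_eq_alt s hpre
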